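-- pv_equiv track=rewrite | github.com/lsh23/algorithm-exercise | 시뮬레이션/드래곤커브.py | solve
-- ===== SOURCE A (Python) =====
-- def solve(n: int, d_curves: list[list[int]]) -> int:
--     dy = [0, -1, 0, 1]
--     dx = [1, 0, -1, 0]
--
--     ans: int = 0
--     # 0 세대 끝점 방향
--     # 0
--     # 1 세대
--     # 0 1
--     # 2 세대
--     # 0 1 2 1
--     # 3 세대
--     # 0 1 2 1 2 3 2 1
--
--     visited: list[list[int]] = [[0] * (101) for _ in range(101)]
--     for d_curve in d_curves:
--         x, y, d, g = d_curve
--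
--         dragon_curve_directions: list[int] = [d]
--         for j in range(10):
--             dragon_curve_directions = dragon_curve_directions + [(x + 1) % 4 for x in
--                                                                  dragon_curve_directions[::-1]]
--         visited[x][y] = 1
--         for dir in dragon_curve_directions[:2 ** g]:
--             nx = x + dx[dir]
--             ny = y + dy[dir]
--             visited[nx][ny] = 1
--             x, y = nx, ny
--
--     for i in range(100):
--         for j in range(100):
--             if visited[i][j] and visited[i + 1][j] and visited[i][j + 1] and visited[i + 1][j + 1]:
--                 ans += 1
--
--     return ans
-- ===== SOURCE B (Python) =====
-- def solve(n: int, d_curves: list[list[int]]) -> int: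
--     dy = [0, -1, 0, 1]
--     dx = [1, 0, -1, 0]
--
--     pts = set()
--     for x, y, d, g in d_curves:
--         cur = d
--         pts.add((x, y))
--         for i in range(1, 2 ** g + 1):
--             x += dx[cur]
--             y += dy[cur]
--             pts.add((x, y))
--             # dragon-curve turn at step i, read off i's binary form:
--             # strip trailing zeros; turn left iff the remaining odd part is 1 mod 4
--             m = i
--             while m % 2 == 0:
--                 m //= 2
--             cur = (cur + (1 if m % 4 == 1 else 3)) % 4
--     ans = 0
--     for i in range(100):
--         for j in range(100):
--             if (i, j) in pts and (i + 1, j) in pts and (i, j + 1) in pts and (i + 1, j + 1) in pts: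
--                 ans += 1
--     return ans
-- ===== Notes on version B (the rewrite author's own statement) =====
-- stated objective: alternative
-- what changed: B drops A's reflection-doubling construction of a 1024-entry direction list and the 101x101 visited matrix: it walks each curve step by step, deriving every turn directly from the step index's 2-adic structure (strip trailing zeros, test the odd part mod 4) and collecting visited lattice points in a set, then counts unit squares by set membership.
-- outside the precondition, e.g. on solve(0, [[0, 3, 1, 3]]): A returns 2, B returns 0; on solve(0, [[50, 50, 0, 11]]): A returns 480, B returns 969
import Mathlib
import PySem

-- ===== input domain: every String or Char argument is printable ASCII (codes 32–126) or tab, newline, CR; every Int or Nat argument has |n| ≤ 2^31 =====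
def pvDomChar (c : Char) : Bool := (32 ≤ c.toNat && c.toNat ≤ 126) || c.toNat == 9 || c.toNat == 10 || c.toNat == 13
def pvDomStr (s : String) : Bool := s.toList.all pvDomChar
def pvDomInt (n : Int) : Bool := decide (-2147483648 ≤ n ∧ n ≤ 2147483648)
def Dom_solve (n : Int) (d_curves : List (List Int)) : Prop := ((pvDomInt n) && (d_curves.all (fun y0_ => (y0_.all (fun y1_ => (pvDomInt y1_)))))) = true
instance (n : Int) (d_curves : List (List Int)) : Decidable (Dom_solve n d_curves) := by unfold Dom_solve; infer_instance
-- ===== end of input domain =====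

-- B replaces A's reflection-doubling direction list and 101x101 visited matrix by a direct
-- step-by-step walk (turns read off the step index) marking a set of points.

-- ===== PRE_ REFERENCE HELPERS (defined first so the row-pattern matcher is owned here) =====
-- Reference description of one curve's cells (used only to STATE the precondition).
def pvStep (x y t : Int) : Int × Int :=
  (x + PySem.List.pyGetD [1, 0, -1, 0] t 0, y + PySem.List.pyGetD [0, -1, 0, 1] t 0)

def pvPath (x y : Int) : List Int → List (Int × Int)
  | [] => []
  | t :: r => pvStep x y t :: pvPath (pvStep x y t).1 (pvStep x y t).2 r

def pvDirs (d : Int) : List Int :=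
  (PySem.List.pyRange 0 10 1).foldl
    (fun ds _ => ds ++ ds.reverse.map (fun t => PySem.Int.mod (t + 1) 4)) [d]

def pvCells (c : List Int) : List (Int × Int) :=
  match c with
  | [x, y, d, g] => (x, y) :: pvPath x y ((pvDirs d).take (2 ^ g.toNat))
  | _ => []

def pvInGrid (p : Int × Int) : Bool :=
  decide (0 ≤ p.1) && decide (p.1 ≤ 100) && decide (0 ≤ p.2) && decide (p.2 ≤ 100)

def pvCurveOk (c : List Int) : Bool :=
  match c with
  | [_, _, d, g] => decide (0 ≤ d ∧ d ≤ 3 ∧ 0 ≤ g ∧ g ≤ 10) && (pvCells c).all pvInGrid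
  | _ => false

-- ===== PORT A =====
-- visited[i][j] = 1 (total form of Python's nested index assignment; exact under Pre_, which
-- keeps every touched cell inside the 101x101 grid)
def aMark (visited : List (List Int)) (i j : Int) : List (List Int) :=
  PySem.List.pySetD visited i (PySem.List.pySetD (PySem.List.pyGetD visited i []) j 1)

-- visited[i][j] (total form of the nested read; exact under Pre_)
def aGet (visited : List (List Int)) (i j : Int) : Int :=
  PySem.List.pyGetD (PySem.List.pyGetD visited i []) j 0

def solve (n : Int) (d_curves : List (List Int)) : Int :=
  let dy : List Int := [0, -1, 0, 1]
  let dx : List Int := [1, 0, -1, 0]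
  let visited0 : List (List Int) := List.replicate 101 (List.replicate 101 0)
  let visited := d_curves.foldl (fun visited d_curve =>
    match d_curve with
    | [x, y, d, g] =>
      -- dragon_curve_directions: ten reflection-doublings; dirs[::-1] is reverse (slice?_none_none_neg_one)
      let dirs : List Int := (PySem.List.pyRange 0 10 1).foldl
        (fun ds _ => ds ++ ds.reverse.map (fun t => PySem.Int.mod (t + 1) 4)) [d]
      let visited := aMark visited x y
      -- dirs[:2**g]; '2 ** g' as (2:Int)^g.toNat is exact for 0 ≤ g (Pre_; a negative g is a float power)
      let st := (PySem.List.slice dirs none (some ((2 : Int) ^ g.toNat))).foldl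
        (fun (s : List (List Int) × Int × Int) dir =>
          let nx := s.2.1 + PySem.List.pyGetD dx dir 0
          let ny := s.2.2 + PySem.List.pyGetD dy dir 0
          (aMark s.1 nx ny, nx, ny)) (visited, x, y)
      st.1
    | _ => visited  -- 'x, y, d, g = d_curve' raises unless the row has exactly 4 entries (excluded by Pre_)
    ) visited0
  (PySem.List.pyRange 0 100 1).foldl (fun ans i =>
    (PySem.List.pyRange 0 100 1).foldl (fun ans j =>
      if aGet visited i j ≠ 0 ∧ aGet visited (i + 1) j ≠ 0 ∧
         aGet visited i (j + 1) ≠ 0 ∧ aGet visited (i + 1) (j + 1) ≠ 0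
      then ans + 1 else ans) ans) 0

-- ===== PORT B =====
-- Source B's 'while m % 2 == 0: m //= 2' then '1 if m % 4 == 1 else 3'; exact for m ≥ 1
-- (the loop indices are ≥ 1; Python's loop never sees 0, the 0-case below is unreachable)
def bTurnGo : Nat → Nat → Int
  | _, 0 => 1
  | m, fuel + 1 => if m % 2 == 0 then bTurnGo (m / 2) fuel
                   else if m % 4 == 1 then 1 else 3

-- the loop halves m at most m times, so fuel m makes the recursion structural
def bTurn (m : Nat) : Int := bTurnGo m m

def solve_alt (n : Int) (d_curves : List (List Int)) : Int :=
  let dy : List Int := [0, -1, 0, 1]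
  let dx : List Int := [1, 0, -1, 0]
  let pts := d_curves.foldl (fun (pts : PySem.Set (Int × Int)) d_curve =>
    match d_curve with
    | [x, y, d, g] =>
      let pts := PySem.Set.add pts (x, y)
      let st := (PySem.List.pyRange 1 ((2 : Int) ^ g.toNat + 1) 1).foldl
        (fun (s : PySem.Set (Int × Int) × Int × Int × Int) i =>
          let cur := s.2.2.2
          let nx := s.2.1 + PySem.List.pyGetD dx cur 0
          let ny := s.2.2.1 + PySem.List.pyGetD dy cur 0
          (PySem.Set.add s.1 (nx, ny), nx, ny, PySem.Int.mod (cur + bTurn i.toNat) 4))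
        (pts, x, y, d)
      st.1
    | _ => pts  -- unpacking raises unless the row has exactly 4 entries (excluded by Pre_)
    ) PySem.Set.empty
  (PySem.List.pyRange 0 100 1).foldl (fun ans i =>
    (PySem.List.pyRange 0 100 1).foldl (fun ans j =>
      if (i, j) ∈ pts ∧ (i + 1, j) ∈ pts ∧ (i, j + 1) ∈ pts ∧ (i + 1, j + 1) ∈ pts
      then ans + 1 else ans) ans) 0

-- ===== PRECONDITION & SPEC =====
-- Pre_ is the natural domain of the underlying problem (BOJ 15685): each row is [x, y, d, g]
-- with a direction 0..3, a generation 0..10, and a curve that stays on the 0..100 grid.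
-- Outside it A raises (bad row shape, negative g, curve off the array) or its value comes from
-- negative-index wraparound / A's hard-wired cap of ten generations (see the claim's cites).
def Pre_solve (n : Int) (d_curves : List (List Int)) : Prop :=
  ∀ c ∈ d_curves, pvCurveOk c = true
instance (n : Int) (d_curves : List (List Int)) : Decidable (Pre_solve n d_curves) := by
  unfold Pre_solve; infer_instance

def pvWitness_solve : Int × List (List Int) := (0, [[1, 1, 0, 1]])

def Spec_solve (n : Int) (d_curves : List (List Int)) (out : Int) : Prop := out = solve_alt n d_curves
instance (n : Int) (d_curves : List (List Int)) (out : Int) : Decidable (Spec_solve n d_curves out) := by unfold Spec_solve; infer_instance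

-- ===== CLAIM (what is proved, stated in full; the proofs are below) =====
def Claim_equal_solve : Prop := ∀ (n : Int) (d_curves : List (List Int)), Dom_solve n d_curves → Pre_solve n d_curves → Spec_solve n d_curves (solve n d_curves)

-- ===== LEMMAS AND PROOFS =====

-- the fold that marks a list of cells on the visited grid
def pvMark (v : List (List Int)) (p : Int × Int) : List (List Int) := aMark v p.1 p.2

-- B's direction sequence: the directions used at steps i0, i0+1, …, i0+n-1 starting from cur
def bDirList : Int → Nat → Nat → List Int
  | _, _, 0 => []
  | cur, i, n + 1 => cur :: bDirList (PySem.Int.mod (cur + bTurn i) 4) (i + 1) n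

-- B's cells of one curve
def pvCellsB (c : List Int) : List (Int × Int) :=
  match c with
  | [x, y, d, g] => (x, y) :: pvPath x y (bDirList d 1 (2 ^ g.toNat))
  | _ => []

-- membership count used as the common normal form of both final scans
def pvCount (P : List (Int × Int)) : Int :=
  (PySem.List.pyRange 0 100 1).foldl (fun ans i =>
    (PySem.List.pyRange 0 100 1).foldl (fun ans j =>
      if (i, j) ∈ P ∧ (i + 1, j) ∈ P ∧ (i, j + 1) ∈ P ∧ (i + 1, j + 1) ∈ P
      then ans + 1 else ans) ans) 0

theorem take_bDirList : ∀ (n N : Nat) (cur : Int) (i : Nat), n ≤ N →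
    (bDirList cur i N).take n = bDirList cur i n := by
  intro n
  induction n with
  | zero => intro N cur i _; simp [bDirList]
  | succ n ih =>
    intro N cur i h
    cases N with
    | zero => omega
    | succ N => simp only [bDirList, List.take_succ_cons, ih N _ (i + 1) (by omega)]

set_option maxRecDepth 10000 in
theorem dirs1024 (d : Int) (h0 : 0 ≤ d) (h3 : d ≤ 3) : bDirList d 1 1024 = pvDirs d := by
  interval_cases d <;> decide

theorem cellsB_eq_cells (c : List Int) (h : pvCurveOk c = true) : pvCellsB c = pvCells c := by
  rcases c with _ | ⟨x, _ | ⟨y, _ | ⟨d, _ | ⟨g, _ | ⟨e, t⟩⟩⟩⟩⟩ <;>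
    simp only [pvCurveOk, pvCellsB, pvCells] at h ⊢
  rw [Bool.and_eq_true, decide_eq_true_eq] at h
  obtain ⟨⟨hd0, hd3, hg0, hg10⟩, -⟩ := h
  rw [← dirs1024 d hd0 hd3,
      take_bDirList _ _ _ _ (by
        calc 2 ^ g.toNat ≤ 2 ^ 10 := Nat.pow_le_pow_right (by norm_num) (by omega)
        _ = 1024 := by norm_num)]

def gridShape (v : List (List Int)) : Prop := v.length = 101 ∧ ∀ r ∈ v, r.length = 101

theorem aMark_shape (v : List (List Int)) (x y : Int) (hv : gridShape v)
    (hx0 : 0 ≤ x) (hx1 : x ≤ 100) : gridShape (aMark v x y) := by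
  obtain ⟨hvl, hvr⟩ := hv
  have hxlt : x.toNat < v.length := by omega
  have hrow : PySem.List.pyGetD v x [] = v[x.toNat] :=
    PySem.List.pyGetD_eq_getElem v [] hx0 (by simp only [hvl]; omega)
  unfold aMark
  rw [PySem.List.pySetD_of_nonneg v _ hx0, hrow]
  refine ⟨by simpa using hvl, ?_⟩
  intro r hr
  rcases List.mem_or_eq_of_mem_set hr with h | h
  · exact hvr r h
  · subst h
    rw [PySem.List.length_pySetD]
    exact hvr _ (List.getElem_mem hxlt)

theorem aGet_mark (v : List (List Int)) (x y i j : Int) (hv : gridShape v)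
    (hx0 : 0 ≤ x) (hx1 : x ≤ 100) (hy0 : 0 ≤ y) (hy1 : y ≤ 100)
    (hi0 : 0 ≤ i) (hi1 : i ≤ 100) (hj0 : 0 ≤ j) (hj1 : j ≤ 100) :
    aGet (aMark v x y) i j = if i = x ∧ j = y then 1 else aGet v i j := by
  obtain ⟨hvl, hvr⟩ := hv
  have hxlt : x.toNat < v.length := by omega
  have hilt : i.toNat < v.length := by omega
  have hrow : PySem.List.pyGetD v x [] = v[x.toNat] :=
    PySem.List.pyGetD_eq_getElem v [] hx0 (by simp only [hvl]; omega)
  have hrowi : PySem.List.pyGetD v i [] = v[i.toNat] :=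
    PySem.List.pyGetD_eq_getElem v [] hi0 (by simp only [hvl]; omega)
  have hrleni : v[i.toNat].length = 101 := hvr _ (List.getElem_mem hilt)
  have hrlen : (PySem.List.pySetD v[x.toNat] y 1).length = 101 := by
    rw [PySem.List.length_pySetD]; exact hvr _ (List.getElem_mem hxlt)
  unfold aMark aGet
  rw [PySem.List.pySetD_of_nonneg v _ hx0, hrow, hrowi,
      PySem.List.pyGetD_eq_getElem _ [] hi0 (by simp only [List.length_set, hvl]; omega),
      List.getElem_set]
  by_cases hix : i = x
  · have : x.toNat = i.toNat := by omega
    rw [if_pos this]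
    rw [PySem.List.pySetD_of_nonneg _ _ hy0,
        PySem.List.pyGetD_eq_getElem _ 0 hj0 (by
          simp only [List.length_set]
          have := hvr _ (List.getElem_mem hxlt); omega),
        List.getElem_set]
    by_cases hjy : j = y
    · rw [if_pos (by omega), if_pos ⟨hix, hjy⟩]
    · rw [if_neg (by omega), if_neg (by tauto)]
      subst hix
      rw [PySem.List.pyGetD_eq_getElem _ 0 hj0 (by
            have := hvr _ (List.getElem_mem hxlt); simp only [this]; omega)]
  · rw [if_neg (by omega), if_neg (by tauto),
        PySem.List.pyGetD_eq_getElem _ 0 hj0 (by simp only [hrleni]; omega)]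

theorem foldMark_get (ps : List (Int × Int)) : ∀ (v : List (List Int)), gridShape v →
    (∀ p ∈ ps, pvInGrid p = true) → ∀ i j : Int, 0 ≤ i → i ≤ 100 → 0 ≤ j → j ≤ 100 →
    (aGet (ps.foldl pvMark v) i j ≠ 0 ↔ (i, j) ∈ ps ∨ aGet v i j ≠ 0) := by
  induction ps with
  | nil => intro v _ _ i j _ _ _ _; simp
  | cons p t ih =>
    intro v hv hall i j hi0 hi1 hj0 hj1
    have hp := hall p (by simp)
    simp only [pvInGrid, Bool.and_eq_true, decide_eq_true_eq] at hp
    obtain ⟨⟨⟨hp1, hp2⟩, hp3⟩, hp4⟩ := hp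
    have hmark := aGet_mark v p.1 p.2 i j ⟨hv.1, hv.2⟩ hp1 hp2 hp3 hp4 hi0 hi1 hj0 hj1
    simp only [List.foldl_cons]
    rw [ih (pvMark v p) (aMark_shape v p.1 p.2 hv hp1 hp2)
          (fun q hq => hall q (by simp [hq])) i j hi0 hi1 hj0 hj1]
    show _ ∨ aGet (aMark v p.1 p.2) i j ≠ 0 ↔ _
    rw [hmark]
    constructor
    · rintro (h | h)
      · exact Or.inl (List.mem_cons_of_mem _ h)
      · by_cases hc : i = p.1 ∧ j = p.2
        · exact Or.inl (by simp [hc])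
        · rw [if_neg hc] at h; exact Or.inr h
    · rintro (h | h)
      · rcases List.mem_cons.mp h with h | h
        · refine Or.inr ?_
          have : i = p.1 ∧ j = p.2 := by
            rw [Prod.ext_iff] at h; exact ⟨h.1, h.2⟩
          rw [if_pos this]; norm_num
        · exact Or.inl h
      · by_cases hc : i = p.1 ∧ j = p.2
        · refine Or.inr ?_; rw [if_pos hc]; norm_num
        · refine Or.inr ?_; rwa [if_neg hc]

theorem aGet_visited0 (i j : Int) :
    aGet (List.replicate 101 (List.replicate 101 (0 : Int))) i j = 0 := by
  have hrow : PySem.List.pyGetD (List.replicate 101 (List.replicate 101 (0 : Int))) i []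
      = [] ∨ PySem.List.pyGetD (List.replicate 101 (List.replicate 101 (0 : Int))) i []
      = List.replicate 101 (0 : Int) := by
    by_cases hr : PySem.Raise.InRange (List.replicate 101 (List.replicate 101 (0 : Int))).length i
    · exact Or.inr (List.eq_of_mem_replicate (PySem.List.pyGetD_mem _ _ hr))
    · refine Or.inl (PySem.List.pyGetD_of_none _ _ _ ?_)
      rwa [PySem.List.pyGet?_eq_none_iff]
  unfold aGet
  rcases hrow with hrow | hrow <;> rw [hrow]
  · by_cases hr : PySem.Raise.InRange ([] : List Int).length j
    · simp [PySem.Raise.InRange] at hr; omega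
    · refine PySem.List.pyGetD_of_none _ _ _ ?_
      rwa [PySem.List.pyGet?_eq_none_iff]
  · by_cases hr : PySem.Raise.InRange (List.replicate 101 (0 : Int)).length j
    · exact List.eq_of_mem_replicate (PySem.List.pyGetD_mem _ _ hr)
    · refine PySem.List.pyGetD_of_none _ _ _ ?_
      rwa [PySem.List.pyGet?_eq_none_iff]

theorem walkA (dirs : List Int) : ∀ (v : List (List Int)) (x y : Int),
    ((dirs.foldl (fun (s : List (List Int) × Int × Int) dir =>
        (aMark s.1 (s.2.1 + PySem.List.pyGetD [1, 0, -1, 0] dir 0)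
                   (s.2.2 + PySem.List.pyGetD [0, -1, 0, 1] dir 0),
         s.2.1 + PySem.List.pyGetD [1, 0, -1, 0] dir 0,
         s.2.2 + PySem.List.pyGetD [0, -1, 0, 1] dir 0)) (v, x, y)).1)
    = (pvPath x y dirs).foldl pvMark v := by
  induction dirs with
  | nil => intro v x y; simp [pvPath]
  | cons t r ih =>
    intro v x y
    simp only [List.foldl_cons, pvPath, ih, pvStep, pvMark]

theorem walkB (N : Nat) : ∀ (a b : Int) (pts : PySem.Set (Int × Int)) (x y cur : Int),
    0 ≤ a → b = a + N →
    ((PySem.List.pyRange a b 1).foldl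
       (fun (s : PySem.Set (Int × Int) × Int × Int × Int) i =>
          (PySem.Set.add s.1 (s.2.1 + PySem.List.pyGetD [1, 0, -1, 0] s.2.2.2 0,
                              s.2.2.1 + PySem.List.pyGetD [0, -1, 0, 1] s.2.2.2 0),
           s.2.1 + PySem.List.pyGetD [1, 0, -1, 0] s.2.2.2 0,
           s.2.2.1 + PySem.List.pyGetD [0, -1, 0, 1] s.2.2.2 0,
           PySem.Int.mod (s.2.2.2 + bTurn i.toNat) 4)) (pts, x, y, cur)).1
    = (pvPath x y (bDirList cur a.toNat N)).foldl PySem.Set.add pts := by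
  induction N with
  | zero =>
    intro a b pts x y cur ha hb
    rw [PySem.List.pyRange_one_eq_nil (by omega)]
    simp [bDirList, pvPath]
  | succ N ih =>
    intro a b pts x y cur ha hb
    rw [PySem.List.pyRange_one_cons (by omega)]
    simp only [List.foldl_cons]
    rw [ih (a + 1) b _ _ _ _ (by omega) (by omega)]
    have hsucc : (a + 1).toNat = a.toNat + 1 := by omega
    rw [hsucc]
    simp only [bDirList, pvPath, pvStep, List.foldl_cons]

theorem bodyB_eq (pts : PySem.Set (Int × Int)) (c : List Int) :
    (match c with
     | [x, y, d, g] =>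
       ((PySem.List.pyRange 1 ((2 : Int) ^ g.toNat + 1) 1).foldl
          (fun (s : PySem.Set (Int × Int) × Int × Int × Int) i =>
            (PySem.Set.add s.1 (s.2.1 + PySem.List.pyGetD [1, 0, -1, 0] s.2.2.2 0,
                                s.2.2.1 + PySem.List.pyGetD [0, -1, 0, 1] s.2.2.2 0),
             s.2.1 + PySem.List.pyGetD [1, 0, -1, 0] s.2.2.2 0,
             s.2.2.1 + PySem.List.pyGetD [0, -1, 0, 1] s.2.2.2 0,
             PySem.Int.mod (s.2.2.2 + bTurn i.toNat) 4))
          (PySem.Set.add pts (x, y), x, y, d)).1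
     | _ => pts)
    = (pvCellsB c).foldl PySem.Set.add pts := by
  rcases c with _ | ⟨x, _ | ⟨y, _ | ⟨d, _ | ⟨g, _ | ⟨e, t⟩⟩⟩⟩⟩ <;>
    simp only [pvCellsB, List.foldl_nil]
  rw [walkB (2 ^ g.toNat) 1 ((2 : Int) ^ g.toNat + 1) _ _ _ _ (by norm_num)
        (by push_cast; ring)]
  simp only [Int.toNat_one, List.foldl_cons]

theorem foldB_eq (cs : List (List Int)) : ∀ (s : PySem.Set (Int × Int)),
    cs.foldl (fun (pts : PySem.Set (Int × Int)) d_curve =>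
      match d_curve with
      | [x, y, d, g] =>
        ((PySem.List.pyRange 1 ((2 : Int) ^ g.toNat + 1) 1).foldl
           (fun (s : PySem.Set (Int × Int) × Int × Int × Int) i =>
             (PySem.Set.add s.1 (s.2.1 + PySem.List.pyGetD [1, 0, -1, 0] s.2.2.2 0,
                                 s.2.2.1 + PySem.List.pyGetD [0, -1, 0, 1] s.2.2.2 0),
              s.2.1 + PySem.List.pyGetD [1, 0, -1, 0] s.2.2.2 0,
              s.2.2.1 + PySem.List.pyGetD [0, -1, 0, 1] s.2.2.2 0,
              PySem.Int.mod (s.2.2.2 + bTurn i.toNat) 4))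
           (PySem.Set.add pts (x, y), x, y, d)).1
      | _ => pts) s
    = PySem.Set.update s (cs.flatMap pvCellsB) := by
  induction cs with
  | nil => intro s; simp [PySem.Set.update]
  | cons c t ih =>
    intro s
    rw [List.foldl_cons, bodyB_eq s c, List.flatMap_cons, PySem.Set.update_append]
    exact ih _

theorem count_congr (f g : Int → Int → Prop) [df : ∀ i j, Decidable (f i j)]
    [dg : ∀ i j, Decidable (g i j)]
    (h : ∀ i j, 0 ≤ i → i < 100 → 0 ≤ j → j < 100 → (f i j ↔ g i j)) :
    (PySem.List.pyRange 0 100 1).foldl (fun ans i =>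
      (PySem.List.pyRange 0 100 1).foldl (fun ans j =>
        if f i j then ans + 1 else ans) ans) (0 : Int)
    = (PySem.List.pyRange 0 100 1).foldl (fun ans i =>
      (PySem.List.pyRange 0 100 1).foldl (fun ans j =>
        if g i j then ans + 1 else ans) ans) (0 : Int) := by
  apply PySem.List.foldl_congr_mem
  intro acc i hi
  apply PySem.List.foldl_congr_mem
  intro acc2 j hj
  rw [PySem.List.mem_pyRange_one] at hi hj
  exact if_congr (h i j hi.1 hi.2 hj.1 hj.2) rfl rfl

theorem bodyA_eq (v : List (List Int)) (c : List Int) :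
    (match c with
     | [x, y, d, g] =>
       ((PySem.List.slice
           ((PySem.List.pyRange 0 10 1).foldl
             (fun ds _ => ds ++ ds.reverse.map (fun t => PySem.Int.mod (t + 1) 4)) [d])
           none (some ((2 : Int) ^ g.toNat))).foldl
          (fun (s : List (List Int) × Int × Int) dir =>
            (aMark s.1 (s.2.1 + PySem.List.pyGetD [1, 0, -1, 0] dir 0)
                       (s.2.2 + PySem.List.pyGetD [0, -1, 0, 1] dir 0),
             s.2.1 + PySem.List.pyGetD [1, 0, -1, 0] dir 0,
             s.2.2 + PySem.List.pyGetD [0, -1, 0, 1] dir 0)) (aMark v x y, x, y)).1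
     | _ => v)
    = (pvCells c).foldl pvMark v := by
  rcases c with _ | ⟨x, _ | ⟨y, _ | ⟨d, _ | ⟨g, _ | ⟨e, t⟩⟩⟩⟩⟩ <;>
    simp only [pvCells, List.foldl_nil]
  rw [PySem.List.slice_to _ (by positivity), walkA]
  have h2 : ((2 : Int) ^ g.toNat).toNat = 2 ^ g.toNat := by
    rw [show (2 : Int) ^ g.toNat = ((2 ^ g.toNat : Nat) : Int) by push_cast; ring,
        Int.toNat_natCast]
  rw [h2]
  simp only [List.foldl_cons]
  rfl

theorem foldA_eq (cs : List (List Int)) : ∀ (v : List (List Int)),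
    cs.foldl (fun (visited : List (List Int)) d_curve =>
      match d_curve with
      | [x, y, d, g] =>
        ((PySem.List.slice
            ((PySem.List.pyRange 0 10 1).foldl
              (fun ds _ => ds ++ ds.reverse.map (fun t => PySem.Int.mod (t + 1) 4)) [d])
            none (some ((2 : Int) ^ g.toNat))).foldl
           (fun (s : List (List Int) × Int × Int) dir =>
             (aMark s.1 (s.2.1 + PySem.List.pyGetD [1, 0, -1, 0] dir 0)
                        (s.2.2 + PySem.List.pyGetD [0, -1, 0, 1] dir 0),
              s.2.1 + PySem.List.pyGetD [1, 0, -1, 0] dir 0,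
              s.2.2 + PySem.List.pyGetD [0, -1, 0, 1] dir 0)) (aMark visited x y, x, y)).1
      | _ => visited) v
    = (cs.flatMap pvCells).foldl pvMark v := by
  induction cs with
  | nil => intro v; rfl
  | cons c t ih =>
    intro v
    rw [List.foldl_cons, bodyA_eq v c, List.flatMap_cons, List.foldl_append]
    exact ih _

theorem cells_inGrid (c : List Int) (h : pvCurveOk c = true) :
    ∀ p ∈ pvCells c, pvInGrid p = true := by
  rcases c with _ | ⟨x, _ | ⟨y, _ | ⟨d, _ | ⟨g, _ | ⟨e, t⟩⟩⟩⟩⟩ <;>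
    simp only [pvCurveOk] at h <;> try exact absurd h (by decide)
  rw [Bool.and_eq_true, List.all_eq_true] at h
  exact h.2

theorem lemma_A (n : Int) (cs : List (List Int)) (hpre : ∀ c ∈ cs, pvCurveOk c = true) :
    solve n cs = pvCount (cs.flatMap pvCells) := by
  have hall : ∀ p ∈ cs.flatMap pvCells, pvInGrid p = true := by
    intro p hp
    obtain ⟨c, hc, hpc⟩ := List.mem_flatMap.mp hp
    exact cells_inGrid c (hpre c hc) p hpc
  have hshape : gridShape (List.replicate 101 (List.replicate 101 (0 : Int))) := by
    constructor
    · simp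
    · intro r hr; rw [List.eq_of_mem_replicate hr]; simp
  simp only [solve]
  rw [foldA_eq cs (List.replicate 101 (List.replicate 101 0))]
  have hchar : ∀ i j : Int, 0 ≤ i → i ≤ 100 → 0 ≤ j → j ≤ 100 →
      (aGet ((cs.flatMap pvCells).foldl pvMark (List.replicate 101 (List.replicate 101 0))) i j ≠ 0
        ↔ (i, j) ∈ cs.flatMap pvCells) := by
    intro i j hi0 hi1 hj0 hj1
    rw [foldMark_get (cs.flatMap pvCells) _ hshape hall i j hi0 hi1 hj0 hj1, aGet_visited0]
    simp
  simp only [pvCount]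
  exact count_congr _ _ (fun i j hi0 hi1 hj0 hj1 =>
    and_congr (hchar i j hi0 (by omega) hj0 (by omega))
      (and_congr (hchar (i + 1) j (by omega) (by omega) hj0 (by omega))
        (and_congr (hchar i (j + 1) hi0 (by omega) (by omega) (by omega))
          (hchar (i + 1) (j + 1) (by omega) (by omega) (by omega) (by omega)))))

theorem lemma_B (n : Int) (cs : List (List Int)) :
    solve_alt n cs = pvCount (cs.flatMap pvCellsB) := by
  simp only [solve_alt]
  rw [foldB_eq cs PySem.Set.empty]
  have hup : ∀ p : Int × Int,
      p ∈ PySem.Set.update PySem.Set.empty (cs.flatMap pvCellsB) ↔ p ∈ cs.flatMap pvCellsB := by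
    intro p
    rw [PySem.Set.mem_update]
    simp [PySem.Set.empty]
  simp only [pvCount]
  exact count_congr _ _ (fun i j _ _ _ _ =>
    and_congr (hup _) (and_congr (hup _) (and_congr (hup _) (hup _))))

-- ===== VERDICT (by name: the statement is the Claim_ definition above) =====
theorem solve_spec : Claim_equal_solve := by
  intro n cs hdom hpre
  clear hdom
  unfold Spec_solve
  rw [lemma_A n cs hpre, lemma_B n cs]
  have : cs.flatMap pvCellsB = cs.flatMap pvCells := by
    induction cs with
    | nil => rfl
    | cons c t ih =>
      simp only [List.flatMap_cons]
      rw [cellsB_eq_cells c (hpre c (by simp)), ih (fun c hc => hpre c (by simp [hc]))]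
  rw [this]
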